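-- pv_equiv track=rewrite | github.com/AMG222/LC | Eje1.py | dic1
-- ===== SOURCE A (Python) =====
-- def dic1(x):
--     L = [y.split("/") for y in x.split()]
--     lista = {}
--     for i in L:
--         if i[1] in lista:
--             lista[i[1]] += 1
--         else:
--             lista[i[1]] = 1
--     return sorted(lista), lista
-- ===== SOURCE B (Python) =====
-- def dic1(x):
--     # Different decomposition: extract all second fields eagerly, dedupe in
--     # first-occurrence order, then count each distinct field with list.count.
--     fields = [y.split("/")[1] for y in x.split()]
--     keys = list(dict.fromkeys(fields))
--     counts = {k: fields.count(k) for k in keys}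
--     return sorted(keys), counts
-- ===== Notes on version B (the rewrite author's own statement) =====
-- stated objective: alternative
-- what changed: Replaces A's running hash-map counter loop with an eager list of second fields, an ordered dedup, and per-key counting via list.count over the field list.
import Mathlib
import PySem

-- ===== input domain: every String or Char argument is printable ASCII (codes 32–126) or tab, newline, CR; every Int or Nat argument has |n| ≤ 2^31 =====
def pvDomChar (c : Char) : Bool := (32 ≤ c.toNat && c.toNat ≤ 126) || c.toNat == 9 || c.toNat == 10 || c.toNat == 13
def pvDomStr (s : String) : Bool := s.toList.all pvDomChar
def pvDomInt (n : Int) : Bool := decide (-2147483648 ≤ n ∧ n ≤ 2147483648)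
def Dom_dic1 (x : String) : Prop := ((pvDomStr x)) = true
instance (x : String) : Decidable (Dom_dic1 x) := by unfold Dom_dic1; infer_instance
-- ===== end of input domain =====

-- B trades A's running dict counter for dedup + list.count; return value only, no mutation.
-- ===== PORT A =====
def dic1 (x : String) : List String × (List (String × Int)) :=
  let L := (PySem.Str.split₀ x).map (fun y => ((PySem.Str.split? y "/").getD []))
  let lista := L.foldl (fun lista i =>
    let k := (PySem.List.pyGet? i 1).getD ""   -- i[1]; Pre_dic1 guarantees in range
    if lista.contains k then lista.insert k (lista.getD k 0 + 1)
    else lista.insert k 1) PySem.Dict.empty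
  (PySem.List.sorted lista.keys (fun s => s) false, lista.items)

-- ===== PORT B =====
def dic1_alt (x : String) : List String × (List (String × Int)) :=
  let fields := (PySem.Str.split₀ x).map
    (fun y => (PySem.List.pyGet? (((PySem.Str.split? y "/").getD [])) 1).getD "")
  let keys := PySem.List.dedup fields
  let counts := keys.map (fun k => (k, (fields.count k : Int)))
  (PySem.List.sorted keys (fun s => s) false, counts)

-- ===== PRECONDITION & SPEC =====
-- Pre_ excludes exactly the inputs where A raises IndexError: some whitespace-separated token lacks a slash separator (fewer than two split parts).
def Pre_dic1 (x : String) : Prop :=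
  ∀ y ∈ PySem.Str.split₀ x, 2 ≤ (((PySem.Str.split? y "/").getD [])).length
instance (x : String) : Decidable (Pre_dic1 x) := by unfold Pre_dic1; infer_instance
def pvWitness_dic1 : String := "a/b c/d a/b"

def Spec_dic1 (x : String) (out : List String × (List (String × Int))) : Prop := out = dic1_alt x
instance (x : String) (out : List String × (List (String × Int))) : Decidable (Spec_dic1 x out) := by unfold Spec_dic1; infer_instance

-- ===== CLAIM (what is proved, stated in full; the proofs are below) =====
def Claim_equal_dic1 : Prop := ∀ (x : String), Dom_dic1 x → Pre_dic1 x → Spec_dic1 x (dic1 x)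

-- ===== LEMMAS AND PROOFS =====
-- A's branchy counting step is exactly the 'insert (getD+1)' counter step.
theorem dic1_step_eq (d : PySem.Dict String Int) (k : String) :
    (if d.contains k then d.insert k (d.getD k 0 + 1) else d.insert k 1) =
    d.insert k (d.getD k 0 + 1) := by
  by_cases h : d.contains k = true
  · simp [h]
  · have h0 : d.getD k 0 = 0 := by
      have := PySem.Dict.contains_eq_isSome_get? (d := d) (k := k)
      cases hg : d.get? k with
      | none => simp [PySem.Dict.getD, hg]
      | some v => rw [hg] at this; simp [this] at h
    simp [h, h0]

theorem dic1_fold_eq_counter (x : String) :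
    ((PySem.Str.split₀ x).map (fun y => ((PySem.Str.split? y "/").getD []))).foldl
      (fun lista i =>
        let k := (PySem.List.pyGet? i 1).getD ""
        if lista.contains k then lista.insert k (lista.getD k 0 + 1)
        else lista.insert k 1) PySem.Dict.empty
    = PySem.Dict.counter ((PySem.Str.split₀ x).map
        (fun y => (PySem.List.pyGet? (((PySem.Str.split? y "/").getD [])) 1).getD "")) := by
  rw [← PySem.Dict.foldl_insert_getD_add_one_eq_counter, List.foldl_map, List.foldl_map]
  exact PySem.List.foldl_congr_mem _ _ _ _ (fun d i _ => dic1_step_eq d _)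

-- ===== VERDICT (by name: the statement is the Claim_ definition above) =====
theorem dic1_spec : Claim_equal_dic1 := by
  intro x _ _
  show dic1 x = dic1_alt x
  simp only [dic1, dic1_alt, dic1_fold_eq_counter x, PySem.Dict.keys_counter,
    PySem.Dict.items_counter]
  simp
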